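-- pv_equiv track=rewrite | github.com/mz00m/ai-labor-predictions | scripts/signals/fetch_github.py | build_repo_map
-- ===== SOURCE A (Python) =====
-- def build_repo_map(taxonomy):
--     """Build a map of unique repos to their associated packages."""
--     repo_map = {}
--     for pkg in taxonomy["packages"]:
--         repo = pkg.get("githubRepo")
--         if not repo:
--             continue
--         if repo not in repo_map:
--             repo_map[repo] = []
--         repo_map[repo].append(pkg["name"])
--     return repo_map
-- ===== SOURCE B (Python) =====
-- def build_repo_map(taxonomy):
--     """Build a map of unique repos to their associated packages."""
--     pkgs = taxonomy["packages"]
--     repos = []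
--     for p in pkgs:
--         r = p.get("githubRepo")
--         if r and r not in repos:
--             repos.append(r)
--     return {r: [p["name"] for p in pkgs if p.get("githubRepo") == r]
--             for r in repos}
-- ===== Notes on version B (the rewrite author's own statement) =====
-- stated objective: alternative
-- what changed: A builds the dict incrementally in one loop (conditional key creation plus in-place append); B first collects the ordered distinct truthy repos in one pass and then builds the result as a dict comprehension whose value lists come from a filtered scan of the packages per repo.
-- outside the precondition, e.g. on build_repo_map({'packages': [{'githubRepo': 'r'}]}): A raises KeyError, B raises KeyError; on build_repo_map({}): A raises KeyError, B raises KeyError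
import Mathlib
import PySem

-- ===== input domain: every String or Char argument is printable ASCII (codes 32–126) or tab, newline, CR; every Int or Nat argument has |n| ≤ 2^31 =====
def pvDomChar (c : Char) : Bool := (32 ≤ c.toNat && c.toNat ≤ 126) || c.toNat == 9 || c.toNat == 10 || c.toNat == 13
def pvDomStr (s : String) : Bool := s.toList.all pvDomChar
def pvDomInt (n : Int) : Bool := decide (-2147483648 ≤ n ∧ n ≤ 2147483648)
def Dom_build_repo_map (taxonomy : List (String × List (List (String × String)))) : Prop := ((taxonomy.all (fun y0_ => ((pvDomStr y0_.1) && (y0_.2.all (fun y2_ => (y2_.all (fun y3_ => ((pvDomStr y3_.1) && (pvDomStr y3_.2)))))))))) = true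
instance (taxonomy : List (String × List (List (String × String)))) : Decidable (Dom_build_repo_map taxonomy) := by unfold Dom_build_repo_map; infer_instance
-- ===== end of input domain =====

-- B replaces A's incremental dict-building loop by two comprehension-style passes:
-- collect the ordered distinct truthy repos, then build each repo's name list by a
-- filtered scan of the packages (objective: alternative; not faster).


-- ===== PORT A =====
-- pkg["name"] raises KeyError when absent; Pre_ excludes that, the port reads getD "" there.
def build_repo_map (taxonomy : List (String × List (List (String × String)))) : List (String × List String) :=
  let pkgs := ((PySem.Dict.mk taxonomy).get? "packages").getD []
  (pkgs.foldl (fun repo_map pkg =>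
      match (PySem.Dict.mk pkg).get? "githubRepo" with
      | none => repo_map
      | some repo =>
        if repo = "" then repo_map
        else
          let repo_map' := if repo_map.contains repo then repo_map else repo_map.insert repo ([] : List String)
          repo_map'.modify repo [] (fun xs => xs ++ [((PySem.Dict.mk pkg).get? "name").getD ""]))
    PySem.Dict.empty).items

-- ===== PORT B =====
def build_repo_map_alt (taxonomy : List (String × List (List (String × String)))) : List (String × List String) :=
  let pkgs := ((PySem.Dict.mk taxonomy).get? "packages").getD []
  let repos : List String := pkgs.foldl (fun rs p =>
      match (PySem.Dict.mk p).get? "githubRepo" with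
      | none => rs
      | some r => if r ≠ "" ∧ r ∉ rs then rs ++ [r] else rs) []
  repos.map (fun r => (r,
    (pkgs.filter (fun p => (PySem.Dict.mk p).get? "githubRepo" == some r)).map
      (fun p => ((PySem.Dict.mk p).get? "name").getD "")))

-- ===== PRECONDITION & SPEC =====
-- Pre_ excludes exactly the inputs where Python A raises KeyError: a missing "packages"
-- key, or a package with a truthy "githubRepo" but no "name" key.
def Pre_build_repo_map (taxonomy : List (String × List (List (String × String)))) : Prop :=
  ((PySem.Dict.mk taxonomy).get? "packages").isSome = true ∧
  ∀ pkg ∈ ((PySem.Dict.mk taxonomy).get? "packages").getD [],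
    (PySem.Dict.mk pkg).getD "githubRepo" "" ≠ "" → ((PySem.Dict.mk pkg).get? "name").isSome = true
instance (taxonomy : List (String × List (List (String × String)))) : Decidable (Pre_build_repo_map taxonomy) := by unfold Pre_build_repo_map; infer_instance

def pvWitness_build_repo_map : (List (String × List (List (String × String)))) :=
  [("packages", [[("githubRepo", "r"), ("name", "a")], [("name", "b")], [("githubRepo", "r"), ("name", "c")]])]

def Spec_build_repo_map (taxonomy : List (String × List (List (String × String)))) (out : List (String × List String)) : Prop := out = build_repo_map_alt taxonomy
instance (taxonomy : List (String × List (List (String × String)))) (out : List (String × List String)) : Decidable (Spec_build_repo_map taxonomy out) := by unfold Spec_build_repo_map; infer_instance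

-- ===== CLAIM (what is proved, stated in full; the proofs are below) =====
def Claim_equal_build_repo_map : Prop := ∀ (taxonomy : List (String × List (List (String × String)))), Dom_build_repo_map taxonomy → Pre_build_repo_map taxonomy → Spec_build_repo_map taxonomy (build_repo_map taxonomy)

-- ===== LEMMAS AND PROOFS =====

-- the (repo, name) pair a package contributes, or none if its repo is falsy
def pvPair (pkg : List (String × String)) : Option (String × String) :=
  match (PySem.Dict.mk pkg).get? "githubRepo" with
  | none => none
  | some r => if r = "" then none else some (r, ((PySem.Dict.mk pkg).get? "name").getD "")

lemma pvPair_fst_ne {pkg : List (String × String)} {q : String × String}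
    (h : pvPair pkg = some q) : q.1 ≠ "" := by
  unfold pvPair at h
  rcases hg : (PySem.Dict.mk pkg).get? "githubRepo" with _ | r <;> rw [hg] at h
  · simp at h
  · by_cases hr : r = ""
    · simp [hr] at h
    · have h' : some (r, ((PySem.Dict.mk pkg).get? "name").getD "") = some q := by
        simpa [hr] using h
      have h2 := Option.some.inj h' 
      rw [← h2]
      exact hr

lemma modify_absorb (d : PySem.Dict String (List String)) (r nm : String) :
    (if d.contains r then d else d.insert r ([] : List String)).modify r [] (fun xs => xs ++ [nm])
      = d.modify r [] (fun xs => xs ++ [nm]) := by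
  by_cases h : d.contains r = true
  · simp [h]
  · have h' : d.contains r = false := by simpa using h
    simp only [h', Bool.false_eq_true, if_false, PySem.Dict.modify,
      PySem.Dict.getD_insert_self, PySem.Dict.insert_insert_self,
      PySem.Dict.getD_of_not_contains d ([] : List String) h']

lemma A_fold_eq (pkgs : List (List (String × String))) :
    pkgs.foldl (fun repo_map pkg =>
      match (PySem.Dict.mk pkg).get? "githubRepo" with
      | none => repo_map
      | some repo =>
        if repo = "" then repo_map
        else
          let repo_map' := if repo_map.contains repo then repo_map else repo_map.insert repo ([] : List String)
          repo_map'.modify repo [] (fun xs => xs ++ [((PySem.Dict.mk pkg).get? "name").getD ""]))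
      PySem.Dict.empty
    = (pkgs.filterMap pvPair).foldl (fun d q => d.modify q.1 [] (fun xs => xs ++ [q.2])) PySem.Dict.empty := by
  rw [List.foldl_filterMap]
  congr 1
  funext d pkg
  unfold pvPair
  rcases hg : (PySem.Dict.mk pkg).get? "githubRepo" with _ | r
  · rfl
  · by_cases hr : r = "" <;> simp [hr, modify_absorb]

lemma A_items (pkgs : List (List (String × String))) :
    (pkgs.foldl (fun repo_map pkg =>
      match (PySem.Dict.mk pkg).get? "githubRepo" with
      | none => repo_map
      | some repo =>
        if repo = "" then repo_map
        else
          let repo_map' := if repo_map.contains repo then repo_map else repo_map.insert repo ([] : List String)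
          repo_map'.modify repo [] (fun xs => xs ++ [((PySem.Dict.mk pkg).get? "name").getD ""]))
      PySem.Dict.empty).items
    = (PySem.Set.ofList ((pkgs.filterMap pvPair).map Prod.fst)).map
        (fun r => (r, ((pkgs.filterMap pvPair).filter (fun q => q.1 == r)).map Prod.snd)) := by
  rw [A_fold_eq]
  set l := pkgs.filterMap pvPair with hl
  have hkeys : (l.foldl (fun d q => d.modify q.1 [] (fun xs => xs ++ [q.2])) PySem.Dict.empty).keys
      = PySem.Set.ofList (l.map Prod.fst) := by
    rw [PySem.Dict.keys_foldl_modify_key l Prod.fst ([] : List String)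
      (fun _ q xs => xs ++ [q.2]) PySem.Dict.empty]
    simp [PySem.Set.update_nil_left]
  have hnd : (l.foldl (fun d q => d.modify q.1 [] (fun xs => xs ++ [q.2])) PySem.Dict.empty).keys.Nodup := by
    apply PySem.Dict.nodup_keys_foldl_modify_key l Prod.fst ([] : List String)
      (fun _ q xs => xs ++ [q.2]) PySem.Dict.empty
    simp
  rw [PySem.Dict.items_eq_map_keys _ hnd ([] : List String), hkeys]
  apply List.map_congr_left
  intro r _
  rw [PySem.Dict.getD_foldl_modify_append l PySem.Dict.empty r]
  simp

lemma B_repos (pkgs : List (List (String × String))) :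
    pkgs.foldl (fun rs p =>
      match (PySem.Dict.mk p).get? "githubRepo" with
      | none => rs
      | some r => if r ≠ "" ∧ r ∉ rs then rs ++ [r] else rs) []
    = PySem.Set.ofList ((pkgs.filterMap pvPair).map Prod.fst) := by
  rw [← PySem.Set.update_nil_left, PySem.Set.update_map_eq_foldl_add, List.foldl_filterMap]
  congr 1
  funext rs pkg
  unfold pvPair
  rcases hg : (PySem.Dict.mk pkg).get? "githubRepo" with _ | r
  · rfl
  · by_cases hr : r = ""
    · simp [hr]
    · by_cases hm : r ∈ rs <;>
        simp [hr, hm, PySem.Set.add, List.contains_eq_mem]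

lemma names_eq (pkgs : List (List (String × String))) (r : String) (hr : r ≠ "") :
    ((pkgs.filterMap pvPair).filter (fun q => q.1 == r)).map Prod.snd
    = (pkgs.filter (fun p => (PySem.Dict.mk p).get? "githubRepo" == some r)).map
        (fun p => ((PySem.Dict.mk p).get? "name").getD "") := by
  induction pkgs with
  | nil => rfl
  | cons p ps ih =>
    rcases hg : (PySem.Dict.mk p).get? "githubRepo" with _ | r'
    · have hpp : pvPair p = none := by unfold pvPair; rw [hg]
      simp only [List.filterMap_cons, List.filter_cons, hpp, hg]
      simpa using ih
    · by_cases hr' : r' = ""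
      · subst hr'
        have hpp : pvPair p = none := by unfold pvPair; rw [hg]; simp
        have hcond : (((PySem.Dict.mk p).get? "githubRepo" == some r) : Bool) = false := by
          rw [hg]; simp [Ne.symm hr]
        simp only [List.filterMap_cons, List.filter_cons, hpp, hcond]
        simpa using ih
      · have hpp : pvPair p = some (r', ((PySem.Dict.mk p).get? "name").getD "") := by
          unfold pvPair; rw [hg]; simp [hr']
        by_cases he : r' = r
        · subst he
          have hcond : (((PySem.Dict.mk p).get? "githubRepo" == some r') : Bool) = true := by
            rw [hg]; simp
          simp only [List.filterMap_cons, List.filter_cons, hpp, hcond]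
          simp [ih]
        · have hcond : (((PySem.Dict.mk p).get? "githubRepo" == some r) : Bool) = false := by
            rw [hg]; simp [he]
          simp only [List.filterMap_cons, List.filter_cons, hpp, hcond]
          simp [he, ih]

-- ===== VERDICT (by name: the statement is the Claim_ definition above) =====
theorem build_repo_map_spec : Claim_equal_build_repo_map := by
  intro taxonomy _ _
  unfold Spec_build_repo_map build_repo_map build_repo_map_alt
  dsimp only
  set pkgs := ((PySem.Dict.mk taxonomy).get? "packages").getD [] with hp
  rw [A_items, B_repos]
  apply List.map_congr_left
  intro r hrmem
  have hr : r ≠ "" := by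
    rw [PySem.Set.mem_ofList] at hrmem
    rcases List.mem_map.mp hrmem with ⟨q, hq, rfl⟩
    rcases List.mem_filterMap.mp hq with ⟨pkg, _, hpk⟩
    exact pvPair_fst_ne hpk
  rw [names_eq pkgs r hr]
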